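-- pv_equiv track=rewrite | github.com/Future-AiLab/ABot-Manipulation | ABot/dataloader/gr00t_lerobot/dataset_mixture/builder_oxeague.py | _pick_group_id
-- ===== SOURCE A (Python) =====
-- from typing import Dict, List, Tuple, Optional, Any, Union
--
-- def _pick_group_id(dataset_name: str, group_prefixes: List[str]) -> str:
--     if not group_prefixes:
--         return dataset_name
--
--     prefixes_sorted = sorted(group_prefixes, key=len, reverse=True)
--     for p in prefixes_sorted:
--         if dataset_name.startswith(p):
--             return p
--     return dataset_name
-- ===== SOURCE B (Python) =====
-- from typing import List
--
-- def _pick_group_id(dataset_name: str, group_prefixes: List[str]) -> str: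
--     best = None
--     for p in group_prefixes:
--         if dataset_name.startswith(p) and (best is None or len(p) > len(best)):
--             best = p
--     return best if best is not None else dataset_name
-- ===== Notes on version B (the rewrite author's own statement) =====
-- stated objective: simpler
-- what changed: Replaces sort-by-length-then-first-match with a single pass keeping the longest matching prefix seen so far (strict > so the first wins on ties, matching the stable sort).
import Mathlib
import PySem

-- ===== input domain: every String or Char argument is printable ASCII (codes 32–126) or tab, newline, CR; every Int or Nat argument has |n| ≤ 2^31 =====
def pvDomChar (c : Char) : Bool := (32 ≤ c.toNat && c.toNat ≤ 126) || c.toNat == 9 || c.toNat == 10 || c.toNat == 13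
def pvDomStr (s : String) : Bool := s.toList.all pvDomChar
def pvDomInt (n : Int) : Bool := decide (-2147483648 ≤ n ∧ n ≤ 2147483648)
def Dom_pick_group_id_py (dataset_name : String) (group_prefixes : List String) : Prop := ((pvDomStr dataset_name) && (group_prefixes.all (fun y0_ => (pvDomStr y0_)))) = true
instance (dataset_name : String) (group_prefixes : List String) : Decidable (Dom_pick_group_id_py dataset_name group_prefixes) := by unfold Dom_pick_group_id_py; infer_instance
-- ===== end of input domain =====

-- B replaces A's sort-by-length-then-first-match with a single pass keeping the
-- longest matching prefix seen so far (simpler: no sort, first match wins ties).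


-- ===== PORT A =====
-- the 'for p in prefixes_sorted: if dataset_name.startswith(p): return p' loop
def pickLoopA (dataset_name : String) : List String → String
  | [] => dataset_name
  | p :: rest =>
      if PySem.Str.startswith dataset_name p then p else pickLoopA dataset_name rest

def pick_group_id_py (dataset_name : String) (group_prefixes : List String) : String :=
  if group_prefixes = [] then dataset_name
  else pickLoopA dataset_name (PySem.List.sorted group_prefixes (fun p => PySem.Str.len p) true)

-- ===== PORT B =====
-- one iteration of B's loop: update best when p matches and is strictly longer
def bStep (m : String → Bool) (best : Option String) (p : String) : Option String :=
  if m p && (best.isNone || decide (PySem.Str.len p > PySem.Str.len (best.getD ""))) then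
    some p
  else best

def pick_group_id_py_alt (dataset_name : String) (group_prefixes : List String) : String :=
  match group_prefixes.foldl (bStep (fun p => PySem.Str.startswith dataset_name p)) none with
  | some b => b
  | none => dataset_name

-- ===== PRECONDITION & SPEC =====
def Spec_pick_group_id_py (dataset_name : String) (group_prefixes : List String) (out : String) : Prop := out = pick_group_id_py_alt dataset_name group_prefixes
instance (dataset_name : String) (group_prefixes : List String) (out : String) : Decidable (Spec_pick_group_id_py dataset_name group_prefixes out) := by unfold Spec_pick_group_id_py; infer_instance

-- ===== CLAIM (what is proved, stated in full; the proofs are below) =====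
def Claim_equal_pick_group_id_py : Prop := ∀ (dataset_name : String) (group_prefixes : List String), Dom_pick_group_id_py dataset_name group_prefixes → Spec_pick_group_id_py dataset_name group_prefixes (pick_group_id_py dataset_name group_prefixes)

-- ===== LEMMAS AND PROOFS =====

-- A's early-return loop is find?-with-default
theorem pickLoopA_eq_find (dn : String) (l : List String) :
    pickLoopA dn l =
      match l.find? (fun p => PySem.Str.startswith dn p) with
      | some p => p
      | none => dn := by
  induction l with
  | nil => rfl
  | cons p rest ih =>
      by_cases h : PySem.Str.startswith dn p = true
      · rw [pickLoopA, if_pos h, List.find?_cons_of_pos h]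
      · rw [pickLoopA, if_neg h, List.find?_cons_of_neg h, ih]

-- inserting x into a length-descending list commutes find? with B's step
theorem find_insertBy (m : String → Bool) (x : String) (l : List String)
    (hp : l.Pairwise (fun a b => PySem.Str.len b ≤ PySem.Str.len a)) :
    (PySem.List.insertBy (fun a b => decide (PySem.Str.len b < PySem.Str.len a)) x l).find? m
      = bStep m (l.find? m) x := by
  induction l with
  | nil =>
      cases hm : m x <;> simp [PySem.List.insertBy, bStep, List.find?, hm]
  | cons y ys ih =>
      have hhead : ∀ z ∈ ys, PySem.Str.len z ≤ PySem.Str.len y := (List.pairwise_cons.mp hp).1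
      have hys : ys.Pairwise (fun a b => PySem.Str.len b ≤ PySem.Str.len a) :=
        (List.pairwise_cons.mp hp).2
      by_cases hlt : PySem.Str.len y < PySem.Str.len x
      · -- x is inserted in front of y :: ys
        simp only [PySem.List.insertBy, hlt, decide_true, if_true]
        cases hm : m x
        · rw [List.find?_cons_of_neg (by simp [hm])]
          rcases hfind : (y :: ys).find? m with _ | b <;> simp [bStep, hm]
        · -- x matches; any previous best in y :: ys is no longer than y, hence shorter than x
          rw [List.find?_cons_of_pos hm]
          rcases hfind : (y :: ys).find? m with _ | b
          · simp [bStep, hm]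
          · have hbmem : b ∈ y :: ys := List.mem_of_find?_eq_some hfind
            have hble : PySem.Str.len b ≤ PySem.Str.len y := by
              rcases List.mem_cons.mp hbmem with h | h
              · simp [h]
              · exact hhead b h
            have hbx : b.length < x.length := by
              have h2 := lt_of_le_of_lt hble hlt
              simp only [PySem.Str.len_eq] at h2
              exact_mod_cast h2
            rw [bStep, if_pos (by simp [hm, PySem.Str.len_eq]; omega)]
      · -- x goes after y
        simp only [PySem.List.insertBy, hlt, decide_false, Bool.false_eq_true, if_false]
        cases hmy : m y
        · rw [List.find?_cons_of_neg (by simp [hmy]),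
            List.find?_cons_of_neg (by simp [hmy])]
          exact ih hys
        · rw [List.find?_cons_of_pos hmy, List.find?_cons_of_pos hmy]
          cases hm : m x
          · simp [bStep, hm]
          · have hxy : x.length ≤ y.length := by
              have h2 := not_lt.mp hlt
              simp only [PySem.Str.len_eq] at h2
              exact_mod_cast h2
            rw [bStep, if_neg (by simp [PySem.Str.len_eq]; omega)]

-- first match of the length-descending stable sort = B's fold
theorem find_sorted_eq_foldl (m : String → Bool) (xs : List String) :
    (PySem.List.sorted xs (fun p => PySem.Str.len p) true).find? m
      = xs.foldl (bStep m) none := by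
  induction xs using List.reverseRecOn with
  | nil => simp [PySem.List.sorted_rev_eq_foldl_insertBy]
  | append_singleton xs x ih =>
      have hsort :
          PySem.List.sorted (xs ++ [x]) (fun p => PySem.Str.len p) true
            = PySem.List.insertBy (fun a b => decide (PySem.Str.len b < PySem.Str.len a)) x
                (PySem.List.sorted xs (fun p => PySem.Str.len p) true) := by
        rw [PySem.List.sorted_rev_eq_foldl_insertBy, PySem.List.sorted_rev_eq_foldl_insertBy,
          List.foldl_append]
        rfl
      rw [hsort, List.foldl_append,
        find_insertBy m x _ (PySem.List.sorted_pairwise_rev xs (fun p => PySem.Str.len p)), ih]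
      rfl

-- ===== VERDICT (by name: the statement is the Claim_ definition above) =====
theorem pick_group_id_py_spec : Claim_equal_pick_group_id_py := by
  intro dn xs _
  unfold Spec_pick_group_id_py pick_group_id_py pick_group_id_py_alt
  by_cases hnil : xs = []
  · subst hnil; rfl
  · simp only [hnil, if_false]
    rw [pickLoopA_eq_find, find_sorted_eq_foldl]
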